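-- pv_equiv track=rewrite | github.com/saalfeldlab/neural-gnn | src/neural_gnn/utils.py | find_suffix_pairs_with_index
-- ===== SOURCE A (Python) =====
-- def find_suffix_pairs_with_index(neuron_list, suffix1, suffix2):
--     pairs = []
--     for i, neuron in enumerate(neuron_list):
--         if neuron.endswith(suffix1):
--             base_name = neuron[:-1]
--             target_name = base_name + suffix2
--             for j, other_neuron in enumerate(neuron_list):
--                 if other_neuron == target_name:
--                     pairs.append(((i, neuron), (j, other_neuron)))
--                     break  # Stop after finding the first match
--     return pairs
-- ===== SOURCE B (Python) =====
-- def find_suffix_pairs_with_index(neuron_list, suffix1, suffix2):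
--     # Sort (name, index) pairs once; for each suffix1-name, binary-search the
--     # suffix-swapped target; the leftmost hit carries the first-occurrence index.
--     names = sorted((name, i) for i, name in enumerate(neuron_list))
--     pairs = []
--     for i, name in enumerate(neuron_list):
--         if name.endswith(suffix1):
--             target = name[:-1] + suffix2
--             lo, hi = 0, len(names)
--             while lo < hi:
--                 mid = (lo + hi) // 2
--                 if names[mid][0] < target:
--                     lo = mid + 1
--                 else:
--                     hi = mid
--             if lo < len(names) and names[lo][0] == target:
--                 pairs.append(((i, name), (names[lo][1], target)))
--     return pairs
-- ===== Notes on version B (the rewrite author's own statement) =====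
-- stated objective: alternative
-- what changed: Replaced A's inner linear rescan of the whole list per matching neuron by sorting the (name, index) pairs once and binary-searching each suffix-swapped target; the leftmost hit in the sorted order carries the first-occurrence index.
import Mathlib
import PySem

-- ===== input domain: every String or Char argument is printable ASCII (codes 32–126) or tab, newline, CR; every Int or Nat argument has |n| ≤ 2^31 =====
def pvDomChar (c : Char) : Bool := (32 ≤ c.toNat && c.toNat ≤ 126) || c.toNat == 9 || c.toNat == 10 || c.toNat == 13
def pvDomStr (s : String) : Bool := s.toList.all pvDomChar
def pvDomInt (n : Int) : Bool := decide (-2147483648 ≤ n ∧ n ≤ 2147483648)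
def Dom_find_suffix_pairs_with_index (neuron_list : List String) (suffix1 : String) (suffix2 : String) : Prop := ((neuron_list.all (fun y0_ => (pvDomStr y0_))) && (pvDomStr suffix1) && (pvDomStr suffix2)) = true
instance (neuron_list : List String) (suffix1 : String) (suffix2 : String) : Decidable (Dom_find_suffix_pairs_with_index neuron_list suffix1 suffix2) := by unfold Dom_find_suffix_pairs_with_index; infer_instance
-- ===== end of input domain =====

-- B replaces A's inner linear scan by a different algorithm: sort the (name, index)
-- pairs once, then binary-search each suffix-swapped target (leftmost hit = first index).

-- ===== PORT A =====
-- inner loop of A: 'for j, other_neuron in enumerate(neuron_list): if other_neuron == target: … break'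
def pvFindFirst (lst : List (Int × String)) (target : String) : Option (Int × String) :=
  match lst with
  | [] => none
  | (j, o) :: rest => if o = target then some (j, o) else pvFindFirst rest target

def find_suffix_pairs_with_index (neuron_list : List String) (suffix1 : String) (suffix2 : String) : List ((Int × String) × (Int × String)) :=
  (PySem.List.enumerate neuron_list 0).foldl (fun pairs p =>
    if PySem.Str.endswith p.2 suffix1 then
      let target := PySem.Str.slice p.2 none (some (-1)) ++ suffix2
      match pvFindFirst (PySem.List.enumerate neuron_list 0) target with
      | some jo => pairs ++ [(p, jo)]
      | none => pairs
    else pairs) []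

-- ===== PORT B =====
-- 'while lo < hi: mid = (lo+hi)//2; …' — lo, hi stay in [0, len(names)], so Nat indices are exact
def pvBsearch (names : List (String × Int)) (target : String) (lo hi : Nat) : Nat :=
  if h : lo < hi then
    let mid := (lo + hi) / 2
    if (names.getD mid ("", 0)).1 < target then pvBsearch names target (mid + 1) hi
    else pvBsearch names target lo mid
  else lo
termination_by hi - lo
decreasing_by all_goals omega

def find_suffix_pairs_with_index_alt (neuron_list : List String) (suffix1 : String) (suffix2 : String) : List ((Int × String) × (Int × String)) :=
  let names := PySem.List.sorted2 ((PySem.List.enumerate neuron_list 0).map (fun p => (p.2, p.1))) (fun q => q.1) (fun q => q.2) false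
  (PySem.List.enumerate neuron_list 0).foldl (fun pairs p =>
    if PySem.Str.endswith p.2 suffix1 then
      let target := PySem.Str.slice p.2 none (some (-1)) ++ suffix2
      let lo := pvBsearch names target 0 names.length
      if _h : lo < names.length ∧ (names.getD lo ("", 0)).1 = target then
        pairs ++ [(p, ((names.getD lo ("", 0)).2, target))]
      else pairs
    else pairs) []

-- ===== PRECONDITION & SPEC =====
def Spec_find_suffix_pairs_with_index (neuron_list : List String) (suffix1 : String) (suffix2 : String) (out : List ((Int × String) × (Int × String))) : Prop := out = find_suffix_pairs_with_index_alt neuron_list suffix1 suffix2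
instance (neuron_list : List String) (suffix1 : String) (suffix2 : String) (out : List ((Int × String) × (Int × String))) : Decidable (Spec_find_suffix_pairs_with_index neuron_list suffix1 suffix2 out) := by unfold Spec_find_suffix_pairs_with_index; infer_instance

-- ===== CLAIM (what is proved, stated in full; the proofs are below) =====
def Claim_equal_find_suffix_pairs_with_index : Prop := ∀ (neuron_list : List String) (suffix1 : String) (suffix2 : String), Dom_find_suffix_pairs_with_index neuron_list suffix1 suffix2 → Spec_find_suffix_pairs_with_index neuron_list suffix1 suffix2 (find_suffix_pairs_with_index neuron_list suffix1 suffix2)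

-- ===== LEMMAS AND PROOFS =====

-- B's tuple sort is the sort by the lexicographic key
lemma sorted2_eq_sorted_lex (xs : List (String × Int)) :
    PySem.List.sorted2 xs (fun q => q.1) (fun q => q.2) false
      = PySem.List.sorted xs (fun q => toLex (q.1, q.2)) false := by
  rw [PySem.List.sorted_eq_foldl_insertBy]
  show xs.foldl (fun acc x => PySem.List.insertBy _ x acc) [] = _
  have hfun : (fun (a b : String × Int) => decide (a.1 < b.1) || (!decide (b.1 < a.1) && decide (a.2 < b.2)))
      = (fun a b => decide (toLex (a.1, a.2) < toLex (b.1, b.2))) := by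
    funext a b
    by_cases h1 : a.1 < b.1
    · simp [h1, Prod.Lex.lt_iff]
    · by_cases h2 : b.1 < a.1
      · simp [h1, h2, Prod.Lex.lt_iff, ne_of_gt h2]
      · have : a.1 = b.1 := le_antisymm (le_of_not_gt h2) (le_of_not_gt h1)
        simp [this, Prod.Lex.lt_iff]
  rw [hfun]
  simp

lemma pvFindFirst_none_iff (lst : List (Int × String)) (t : String) :
    pvFindFirst lst t = none ↔ ∀ p ∈ lst, p.2 ≠ t := by
  induction lst with
  | nil => simp [pvFindFirst]
  | cons p rest ih =>
    obtain ⟨j, o⟩ := p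
    by_cases h : o = t <;> simp [pvFindFirst, h, ih]

lemma pvFindFirst_min (lst : List (Int × String)) (t : String) (r : Int × String)
    (hpw : lst.Pairwise (fun p q => p.1 < q.1))
    (h : pvFindFirst lst t = some r) :
    r ∈ lst ∧ r.2 = t ∧ ∀ q ∈ lst, q.2 = t → r.1 ≤ q.1 := by
  induction lst with
  | nil => simp [pvFindFirst] at h
  | cons p rest ih =>
    obtain ⟨j, o⟩ := p
    rw [List.pairwise_cons] at hpw
    simp only [pvFindFirst] at h
    split at h
    · cases h
      refine ⟨List.mem_cons_self, by simpa using ‹o = t›, ?_⟩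
      intro q hq _
      rcases List.mem_cons.mp hq with rfl | hq'
      · exact le_refl _
      · exact le_of_lt (hpw.1 q hq')
    · obtain ⟨hm, ht, hmin⟩ := ih hpw.2 h
      refine ⟨List.mem_cons_of_mem _ hm, ht, ?_⟩
      intro q hq hqt
      rcases List.mem_cons.mp hq with rfl | hq'
      · exact absurd (by simpa using hqt) ‹¬ o = t›
      · exact hmin q hq' hqt

-- binary-search invariant: the result splits the (fst-monotone) list at target
lemma pvBsearch_spec (L : List (String × Int)) (t : String)
    (hmono : ∀ (i j : Nat) (hij : i ≤ j) (hj : j < L.length), (L[i]'(by omega)).1 ≤ (L[j]'hj).1) :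
    ∀ (n lo hi : Nat), hi - lo ≤ n → lo ≤ hi → hi ≤ L.length →
    (∀ k (hk : k < L.length), k < lo → (L[k]'hk).1 < t) →
    (∀ k (hk : k < L.length), hi ≤ k → ¬ (L[k]'hk).1 < t) →
    (∀ k (hk : k < L.length), k < pvBsearch L t lo hi → (L[k]'hk).1 < t) ∧
    (∀ k (hk : k < L.length), pvBsearch L t lo hi ≤ k → ¬ (L[k]'hk).1 < t) ∧
    lo ≤ pvBsearch L t lo hi ∧ pvBsearch L t lo hi ≤ hi := by
  intro n
  induction n with
  | zero =>
    intro lo hi hle hlohi hhi hlow hhigh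
    have : lo = hi := by omega
    subst this
    rw [pvBsearch]
    simp only [lt_irrefl, dite_false]
    exact ⟨hlow, hhigh, le_refl _, le_refl _⟩
  | succ n ih =>
    intro lo hi hle hlohi hhi hlow hhigh
    rw [pvBsearch]
    by_cases h : lo < hi
    · simp only [h, dite_true]
      have hmid : (lo + hi) / 2 < hi := by omega
      have hmidlo : lo ≤ (lo + hi) / 2 := by omega
      have hmidlen : (lo + hi) / 2 < L.length := by omega
      rw [List.getD_eq_getElem L ("", 0) hmidlen]
      by_cases hc : (L[(lo + hi) / 2]'hmidlen).1 < t
      · simp only [hc, if_true]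
        obtain ⟨a, b, c, d⟩ := ih ((lo + hi) / 2 + 1) hi (by omega) (by omega) hhi
          (by intro k hk hklt
              exact lt_of_le_of_lt (hmono k ((lo + hi) / 2) (by omega) hmidlen) hc)
          hhigh
        exact ⟨a, b, by omega, d⟩
      · simp only [hc, if_false]
        obtain ⟨a, b, c, d⟩ := ih lo ((lo + hi) / 2) (by omega) (by omega) (by omega) hlow
          (by intro k hk hmk hkt
              exact hc (lt_of_le_of_lt (hmono ((lo + hi) / 2) k hmk hk) hkt))
        exact ⟨a, b, c, by omega⟩
    · simp only [h, dite_false]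
      have : lo = hi := by omega
      subst this
      exact ⟨hlow, hhigh, le_refl _, le_refl _⟩

-- the heart: B's sort + binary search computes exactly A's first-match scan
lemma core (nl : List String) (t : String) :
    (let names := PySem.List.sorted2 ((PySem.List.enumerate nl 0).map (fun p => (p.2, p.1))) (fun q => q.1) (fun q => q.2) false
     let lo := pvBsearch names t 0 names.length
     if _h : lo < names.length ∧ (names.getD lo ("", 0)).1 = t then
       some ((names.getD lo ("", 0)).2, t)
     else none)
      = pvFindFirst (PySem.List.enumerate nl 0) t := by
  simp only
  set xs := (PySem.List.enumerate nl 0).map (fun p => (p.2, p.1)) with hxs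
  rw [sorted2_eq_sorted_lex]
  set L := PySem.List.sorted xs (fun q => toLex (q.1, q.2)) false with hL
  have hperm : L.Perm xs := PySem.List.sorted_perm _ _ _
  have hkeymono : ∀ (i j : Nat) (hij : i ≤ j) (hj : j < L.length),
      toLex ((L[i]'(by omega)).1, (L[i]'(by omega)).2) ≤ toLex ((L[j]'hj).1, (L[j]'hj).2) := by
    intro i j hij hj
    exact PySem.List.key_sorted_getElem_mono xs (fun q => toLex (q.1, q.2)) hij hj
  have hmono : ∀ (i j : Nat) (hij : i ≤ j) (hj : j < L.length), (L[i]'(by omega)).1 ≤ (L[j]'hj).1 := by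
    intro i j hij hj
    have := hkeymono i j hij hj
    rcases Prod.Lex.le_iff.mp this with h | ⟨h, _⟩
    · exact le_of_lt h
    · exact le_of_eq h
  have hsndmono : ∀ (i j : Nat) (hij : i ≤ j) (hj : j < L.length), (L[i]'(by omega)).1 = (L[j]'hj).1 →
      (L[i]'(by omega)).2 ≤ (L[j]'hj).2 := by
    intro i j hij hj heq
    have := hkeymono i j hij hj
    rcases Prod.Lex.le_iff.mp this with h | ⟨_, h⟩
    · exact absurd heq (ne_of_lt h)
    · exact h
  -- membership transfer between L and the enumeration
  have hmemL : ∀ (s : String) (j : Int), (s, j) ∈ L ↔ (j, s) ∈ PySem.List.enumerate nl 0 := by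
    intro s j
    rw [hperm.mem_iff, hxs, List.mem_map]
    constructor
    · rintro ⟨⟨j', s'⟩, hm, he⟩
      obtain ⟨rfl, rfl⟩ : s' = s ∧ j' = j := by
        injection he with h1 h2
        exact ⟨h1, h2⟩
      exact hm
    · intro hm
      exact ⟨(j, s), hm, rfl⟩
  obtain ⟨hlow, hhigh, -, hle⟩ := pvBsearch_spec L t hmono (L.length - 0) 0 L.length (by omega) (by omega) (le_refl _)
    (by intro k hk h; omega) (by intro k hk h; omega)
  set r0 := pvBsearch L t 0 L.length with hr0
  by_cases h : r0 < L.length ∧ (L.getD r0 ("", 0)).1 = t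
  · obtain ⟨hr0len, hgetd⟩ := h
    have hr0t : (L[r0]'hr0len).1 = t := by
      rwa [List.getD_eq_getElem L ("", 0) hr0len] at hgetd
    rw [dif_pos ⟨hr0len, hgetd⟩, List.getD_eq_getElem L ("", 0) hr0len]
    -- the found element, as a member of the enumeration
    have hmem : ((L[r0]'hr0len).2, t) ∈ PySem.List.enumerate nl 0 := by
      rw [← hmemL, ← hr0t]
      exact List.getElem_mem hr0len
    cases hff : pvFindFirst (PySem.List.enumerate nl 0) t with
    | none =>
      have := (pvFindFirst_none_iff _ t).mp hff _ hmem
      simp at this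
    | some r =>
      obtain ⟨hrm, hrt, hrmin⟩ := pvFindFirst_min _ t r (PySem.List.pairwise_lt_enumerate nl 0) hff
      -- r.1 ≤ L[r0].2, by minimality of the first match
      have h1 : r.1 ≤ (L[r0]'hr0len).2 := hrmin _ hmem rfl
      -- L[r0].2 ≤ r.1 : (t, r.1) sits in L at a position q ≥ r0
      have hrm' : (t, r.1) ∈ L := by
        rw [hmemL]
        have : r = (r.1, t) := by rw [← hrt]
        rwa [this] at hrm
      obtain ⟨q, hq, hLq⟩ := List.mem_iff_getElem.mp hrm'
      have hq0 : r0 ≤ q := by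
        by_contra hlt
        have := hlow q hq (by omega)
        rw [hLq] at this
        exact lt_irrefl t this
      have h2 : (L[r0]'hr0len).2 ≤ r.1 := by
        have := hsndmono r0 q hq0 hq (by rw [hLq, hr0t])
        rwa [hLq] at this
      have hreq : r = ((L[r0]'hr0len).2, t) := by
        have hfst : r.1 = (L[r0]'hr0len).2 := le_antisymm h1 h2
        rw [← hfst, ← hrt]
      rw [hreq]
  · rw [dif_neg h]
    symm
    rw [pvFindFirst_none_iff]
    intro p hp hpt
    -- p = (p.1, t) ∈ enum → (t, p.1) ∈ L at position q
    have hpL : (t, p.1) ∈ L := by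
      rw [hmemL]
      have : p = (p.1, t) := by rw [← hpt]
      rwa [this] at hp
    obtain ⟨q, hq, hLq⟩ := List.mem_iff_getElem.mp hpL
    have hq0 : r0 ≤ q := by
      by_contra hlt
      have := hlow q hq (by omega)
      rw [hLq] at this
      exact lt_irrefl t this
    have hr0len : r0 < L.length := by omega
    -- t ≤ L[r0].1 ≤ L[q].1 = t, so L[r0].1 = t, contradicting ¬h
    have hge : ¬ (L[r0]'hr0len).1 < t := hhigh r0 hr0len (le_refl _)
    have hle' : (L[r0]'hr0len).1 ≤ (L[q]'hq).1 := hmono r0 q hq0 hq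
    rw [hLq] at hle'
    have : (L[r0]'hr0len).1 = t := le_antisymm hle' (le_of_not_gt hge)
    exact h ⟨hr0len, by rwa [List.getD_eq_getElem L ("", 0) hr0len]⟩

-- ===== VERDICT (by name: the statement is the Claim_ definition above) =====
theorem find_suffix_pairs_with_index_spec : Claim_equal_find_suffix_pairs_with_index := by
  intro neuron_list suffix1 suffix2 _
  unfold Spec_find_suffix_pairs_with_index
  unfold find_suffix_pairs_with_index find_suffix_pairs_with_index_alt
  simp only
  apply PySem.List.foldl_congr_mem
  intro acc p _
  by_cases he : PySem.Str.endswith p.2 suffix1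
  · simp only [he, if_true]
    have hcore := core neuron_list (PySem.Str.slice p.2 none (some (-1)) ++ suffix2)
    simp only at hcore
    split at hcore
    next hc =>
      rw [← hcore, dif_pos hc]
    next hc =>
      rw [← hcore, dif_neg hc]
  · simp only [he]
    rfl
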